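-- pv_equiv track=rewrite | github.com/swosu/SwosuCsPythonExamples | CS1_CS2/main.py | log_sizes
-- ===== SOURCE A (Python) =====
-- def log_sizes(start: int = 10, decades: int = 5) -> list[int]:
--     """
--     Log-ish growth sizes: 10, 100, 1000, ...
--     decades=5 -> [10, 100, 1000, 10000, 100000]
--     """
--     if start <= 0:
--         raise ValueError("start must be > 0")
--     if decades < 1:
--         raise ValueError("decades must be >= 1")
--     sizes = []
--     value = start
--     for _ in range(decades):
--         sizes.append(value)
--         value *= 10
--     return sizes
-- ===== SOURCE B (Python) =====
-- def log_sizes(start: int = 10, decades: int = 5) -> list[int]: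
--     if start <= 0:
--         raise ValueError("start must be > 0")
--     if decades < 1:
--         raise ValueError("decades must be >= 1")
--     sizes = []
--     p = 10 ** (decades - 1)
--     while p >= 1:
--         sizes.append(start * p)
--         p //= 10
--     sizes.reverse()
--     return sizes
-- ===== Notes on version B (the rewrite author's own statement) =====
-- stated objective: alternative
-- what changed: Replaced the forward accumulator loop (running value multiplied by 10 each step) with a descending construction: compute the largest power 10**(decades-1) once, collect start*p while flooring p by 10 down to zero, then reverse the list.
import Mathlib
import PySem

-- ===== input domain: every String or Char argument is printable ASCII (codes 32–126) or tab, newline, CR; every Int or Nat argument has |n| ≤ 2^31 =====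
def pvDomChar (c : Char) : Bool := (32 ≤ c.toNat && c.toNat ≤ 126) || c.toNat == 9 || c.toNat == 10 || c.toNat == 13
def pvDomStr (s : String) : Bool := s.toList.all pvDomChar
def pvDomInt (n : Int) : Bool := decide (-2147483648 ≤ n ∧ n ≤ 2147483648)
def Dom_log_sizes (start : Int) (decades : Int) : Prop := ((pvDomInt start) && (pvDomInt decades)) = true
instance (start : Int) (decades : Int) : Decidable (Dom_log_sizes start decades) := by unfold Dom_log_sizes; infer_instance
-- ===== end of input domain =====

-- B replaces A's forward accumulator loop with a descending construction (largest power first,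
-- p floored by 10 each step, list reversed at the end); both programs raise ValueError on
-- start ≤ 0 or decades < 1, which Pre_ excludes.

-- ===== PORT A =====
-- A raises ValueError in its two guard branches; the port returns [] there (outside Pre_).
def log_sizes (start : Int) (decades : Int) : List Int :=
  if start ≤ 0 then []
  else if decades < 1 then []
  else
    ((PySem.List.pyRange 0 decades 1).foldl
      (fun (st : List Int × Int) _ => (st.1 ++ [st.2], st.2 * 10)) ([], start)).1

-- ===== PORT B =====
-- the while loop of B: collect start*p while p ≥ 1, flooring p by 10 each step
lemma log_sizes_alt_dec (p : Int) (h : 1 ≤ p) : (PySem.Int.floordiv p 10).toNat < p.toNat := by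
  have he : PySem.Int.floordiv p 10 = p / 10 := PySem.Int.floordiv_eq_ediv_of_pos (by norm_num)
  have h1 : p / 10 < p := by
    have h10 := Int.mul_ediv_add_emod p 10
    have hm := Int.emod_nonneg p (b := 10) (by norm_num)
    have hq : 0 ≤ p / 10 := Int.ediv_nonneg (by omega) (by norm_num)
    nlinarith [Int.emod_lt_of_pos p (b := 10) (by norm_num)]
  have h2 : 0 ≤ p / 10 := Int.ediv_nonneg (by omega) (by norm_num)
  omega

def log_sizes_alt_loop (start : Int) (p : Int) : List Int :=
  if _h : 1 ≤ p then start * p :: log_sizes_alt_loop start (PySem.Int.floordiv p 10) else []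
termination_by p.toNat
decreasing_by exact log_sizes_alt_dec p _h

-- B raises ValueError in the same two guard branches; the port returns [] there (outside Pre_).
def log_sizes_alt (start : Int) (decades : Int) : List Int :=
  if start ≤ 0 then []
  else if decades < 1 then []
  else (log_sizes_alt_loop start (10 ^ (decades - 1).toNat)).reverse

-- ===== PRECONDITION & SPEC =====
-- Pre_ excludes exactly the inputs on which A raises ValueError (start ≤ 0 or decades < 1).
def Pre_log_sizes (start : Int) (decades : Int) : Prop := 0 < start ∧ 1 ≤ decades
instance (start : Int) (decades : Int) : Decidable (Pre_log_sizes start decades) := by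
  unfold Pre_log_sizes; infer_instance
def pvWitness_log_sizes : Int × Int := (10, 5)

def Spec_log_sizes (start : Int) (decades : Int) (out : List Int) : Prop := out = log_sizes_alt start decades
instance (start : Int) (decades : Int) (out : List Int) : Decidable (Spec_log_sizes start decades out) := by unfold Spec_log_sizes; infer_instance

-- ===== CLAIM (what is proved, stated in full; the proofs are below) =====
def Claim_equal_log_sizes : Prop := ∀ (start : Int) (decades : Int), Dom_log_sizes start decades → Pre_log_sizes start decades → Spec_log_sizes start decades (log_sizes start decades)

-- ===== LEMMAS AND PROOFS =====

lemma log_sizes_foldl_aux (n : Nat) (acc : List Int) (v : Int) :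
    (List.range n).foldl
      (fun (st : List Int × Int) (_ : Nat) => (st.1 ++ [st.2], st.2 * 10)) (acc, v)
    = (acc ++ (List.range n).map (fun i => v * 10 ^ i), v * 10 ^ n) := by
  induction n generalizing acc v with
  | zero => simp
  | succ n ih =>
    rw [List.range_succ, List.foldl_append, ih]
    simp [pow_succ, mul_assoc]

lemma log_sizes_alt_loop_pow (start : Int) (k : Nat) :
    log_sizes_alt_loop start (10 ^ k)
    = ((List.range (k + 1)).map (fun i => start * 10 ^ i)).reverse := by
  induction k with
  | zero =>
    rw [log_sizes_alt_loop, dif_pos (by norm_num)]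
    rw [log_sizes_alt_loop, dif_neg (by decide)]
    simp
  | succ k ih =>
    rw [log_sizes_alt_loop, dif_pos (one_le_pow₀ (by norm_num))]
    have hfd : PySem.Int.floordiv ((10:Int) ^ (k + 1)) 10 = 10 ^ k := by
      rw [PySem.Int.floordiv_eq_ediv_of_pos (by norm_num), pow_succ]
      exact Int.mul_ediv_cancel _ (by norm_num)
    rw [hfd, ih, List.range_succ (n := k + 1), List.map_append, List.reverse_append]
    simp

theorem log_sizes_spec : Claim_equal_log_sizes := by
  intro start decades _ hpre
  obtain ⟨hs, hd⟩ := hpre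
  have h1 : ¬ start ≤ 0 := by omega
  have h2 : ¬ decades < 1 := by omega
  unfold Spec_log_sizes log_sizes
  rw [if_neg h1, if_neg h2]
  rw [PySem.List.pyRange_one]
  rw [List.foldl_map, log_sizes_foldl_aux]
  unfold log_sizes_alt
  rw [if_neg h1, if_neg h2, log_sizes_alt_loop_pow]
  have : (decades - 1).toNat + 1 = decades.toNat := by omega
  rw [this]
  simp
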